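-- pv_equiv track=rewrite | github.com/AndrewTheProgrammer/Hexapawn-AI | Text Edition.py | player_legal_moves
-- ===== SOURCE A (Python) =====
-- def player_legal_moves (playerpos,computerpos):
--     list1=[]
--     for pawn in playerpos:
--         if not pawn[0]+str(int(pawn[1])+1) in computerpos:
--             list1.append([pawn,pawn[0]+str(int(pawn[1])+1)])
--         if pawn[0]=='b':
--             if 'a'+str(int(pawn[1])+1) in computerpos:
--                 list1.append([pawn,'a'+str(int(pawn[1])+1)])
--             if 'c'+str(int(pawn[1])+1) in computerpos:
--                 list1.append([pawn,'c'+str(int(pawn[1])+1)])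
--         else:
--             if 'b'+str(int(pawn[1])+1) in computerpos:
--                 list1.append([pawn,'b'+str(int(pawn[1])+1)])
--     return list1
-- ===== SOURCE B (Python) =====
-- def player_legal_moves(playerpos, computerpos):
--     moves = []
--     for pawn in playerpos:
--         rank = str(int(pawn[1]) + 1)
--         if all(e != pawn[0] + rank for e in computerpos):
--             moves.append([pawn, pawn[0] + rank])
--         if pawn[0] == 'b':
--             caps = {e for e in computerpos
--                     if e[1:] == rank and (e[:1] == 'a' or e[:1] == 'c')}
--         else:
--             caps = {e for e in computerpos
--                     if e[1:] == rank and e[:1] == 'b'}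
--         for target in sorted(caps):
--             moves.append([pawn, target])
--     return moves
-- ===== Notes on version B (the rewrite author's own statement) =====
-- stated objective: alternative
-- what changed: Capture detection is inverted: A builds candidate diagonal squares per pawn via hardcoded column branches and tests their membership in computerpos, while B scans the enemy squares with an attack predicate that splits each enemy string into column and rank, collects the attacked enemies in a set and emits them sorted; the forward move is checked by an all() scan instead of 'in'.
import Mathlib
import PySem

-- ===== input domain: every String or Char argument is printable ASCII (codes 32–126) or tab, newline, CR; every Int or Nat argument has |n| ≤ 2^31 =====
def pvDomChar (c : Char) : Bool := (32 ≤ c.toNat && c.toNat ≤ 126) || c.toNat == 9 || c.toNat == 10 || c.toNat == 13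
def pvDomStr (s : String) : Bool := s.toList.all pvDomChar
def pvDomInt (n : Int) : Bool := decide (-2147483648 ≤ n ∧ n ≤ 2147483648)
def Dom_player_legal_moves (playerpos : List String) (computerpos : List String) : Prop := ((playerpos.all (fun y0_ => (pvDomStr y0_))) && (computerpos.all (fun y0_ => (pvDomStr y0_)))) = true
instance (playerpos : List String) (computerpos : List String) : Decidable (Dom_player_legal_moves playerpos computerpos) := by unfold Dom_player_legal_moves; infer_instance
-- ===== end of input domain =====

-- B inverts the capture search: instead of A's per-column branches that build candidate
-- squares and test membership in computerpos, B scans the enemy squares with an attack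
-- predicate that decomposes each enemy string, collects the hits in a set and sorts them
-- (objective: alternative). Equal return value wherever A returns (Pre_ below).

-- ===== PORT A =====
-- one iteration of A's loop: acc is list1 so far, pawn the current pawn
def pvStepA (computerpos : List String) (acc : List (List String)) (pawn : String) : List (List String) :=
  match pawn.toList with
  | c0 :: c1 :: _ =>
    match PySem.Int.ofChars? [c1] with
    | some n =>
      let nxt := PySem.Int.toChars (n + 1)
      let fwd := String.ofList (c0 :: nxt)
      let acc1 := if computerpos.contains fwd then acc else acc ++ [[pawn, fwd]]
      if c0 = 'b' then
        let la := String.ofList ('a' :: nxt)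
        let lc := String.ofList ('c' :: nxt)
        let acc2 := if computerpos.contains la then acc1 ++ [[pawn, la]] else acc1
        if computerpos.contains lc then acc2 ++ [[pawn, lc]] else acc2
      else
        let lb := String.ofList ('b' :: nxt)
        if computerpos.contains lb then acc1 ++ [[pawn, lb]] else acc1
    | none => acc        -- int(pawn[1]) raises ValueError: excluded by Pre_
  | _ => acc             -- pawn[0]/pawn[1] raises IndexError: excluded by Pre_

def player_legal_moves (playerpos : List String) (computerpos : List String) : List (List String) :=
  playerpos.foldl (pvStepA computerpos) []

-- ===== PORT B =====
-- the moves Source B's loop body contributes for one pawn: forward move if no enemy sits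
-- there, then the sorted set of enemy squares the pawn attacks (e[1:] / e[:1] are
-- ported as toList.drop 1 / toList.take 1 — exact for non-negative slice bounds)
def pvSegB (computerpos : List String) (pawn : String) : List (List String) :=
  match pawn.toList with
  | c0 :: c1 :: _ =>
    match PySem.Int.ofChars? [c1] with
    | some n =>
      let rank := PySem.Int.toChars (n + 1)
      let f := if computerpos.all (fun e => e != String.ofList (c0 :: rank))
               then [[pawn, String.ofList (c0 :: rank)]] else []
      let caps : PySem.Set String :=
        if c0 = 'b' then
          PySem.Set.ofList (computerpos.filter (fun e =>
            e.toList.drop 1 == rank && (e.toList.take 1 == ['a'] || e.toList.take 1 == ['c'])))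
        else
          PySem.Set.ofList (computerpos.filter (fun e =>
            e.toList.drop 1 == rank && e.toList.take 1 == ['b']))
      f ++ (PySem.List.sorted caps (fun x => x) false).map (fun t => [pawn, t])
    | none => []         -- int(pawn[1]) raises ValueError: excluded by Pre_
  | _ => []              -- pawn[1] raises IndexError: excluded by Pre_

def player_legal_moves_alt (playerpos : List String) (computerpos : List String) : List (List String) :=
  playerpos.foldl (fun acc pawn => acc ++ pvSegB computerpos pawn) []

-- ===== PRECONDITION & SPEC =====
-- Pre_ excludes exactly the pawns on which A raises: a pawn shorter than 2 characters
-- (IndexError on pawn[0]/pawn[1]) or whose second character is not an ASCII digit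
-- (ValueError in int). It is stated on the UTF-8 bytes: on the ASCII domain Dom byte 1
-- IS character 1, and bytes keep 'decide' cheap where decoding chars is not.
def pvOkPawn (p : String) : Bool :=
  2 ≤ p.toByteArray.size && 48 ≤ (p.toByteArray.get! 1).toNat && (p.toByteArray.get! 1).toNat ≤ 57
def Pre_player_legal_moves (playerpos : List String) (computerpos : List String) : Prop :=
  (playerpos.all pvOkPawn) = true
instance (playerpos : List String) (computerpos : List String) : Decidable (Pre_player_legal_moves playerpos computerpos) := by unfold Pre_player_legal_moves; infer_instance

def pvWitness_player_legal_moves : List String × List String := (["a1", "b1"], ["b2", "c2"])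

def Spec_player_legal_moves (playerpos : List String) (computerpos : List String) (out : List (List String)) : Prop := out = player_legal_moves_alt playerpos computerpos
instance (playerpos : List String) (computerpos : List String) (out : List (List String)) : Decidable (Spec_player_legal_moves playerpos computerpos out) := by unfold Spec_player_legal_moves; infer_instance

-- ===== CLAIM (what is proved, stated in full; the proofs are below) =====
def Claim_equal_player_legal_moves : Prop := ∀ (playerpos : List String) (computerpos : List String), Dom_player_legal_moves playerpos computerpos → Pre_player_legal_moves playerpos computerpos → Spec_player_legal_moves playerpos computerpos (player_legal_moves playerpos computerpos)

-- ===== LEMMAS AND PROOFS =====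

-- a string equals String.ofList l iff its character list is l
theorem pv_eq_ofList_iff (e : String) (l : List Char) : e = String.ofList l ↔ e.toList = l := by
  constructor
  · intro h; rw [h]; simp
  · intro h
    have := congrArg String.ofList h
    simpa using this

-- B's attack predicate for one column c holds exactly on the square c :: rank
theorem pv_pred_iff (e : String) (r : List Char) (c : Char) :
    ((e.toList.drop 1 == r) && (e.toList.take 1 == [c])) = true ↔ e = String.ofList (c :: r) := by
  rw [pv_eq_ofList_iff]
  cases h : e.toList with
  | nil => simp [h]
  | cons h0 t => simp [h, and_comm]

-- 'a' + rank precedes 'c' + rank in Python's string order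
theorem pv_lt_ac (r : List Char) : String.ofList ('a' :: r) < String.ofList ('c' :: r) := by
  rw [String.lt_iff_toList_lt]
  simp
  exact List.Lex.rel (by decide)

-- sorted set of the enemies matching a two-square predicate, written out
theorem pv_sorted_two (cp : List String) (A C : String) (hlt : A < C) (p : String → Bool)
    (hp : ∀ e, p e = true ↔ (e = A ∨ e = C)) :
    PySem.List.sorted (PySem.Set.ofList (cp.filter p)) (fun x => x) false
      = (if A ∈ cp then [A] else []) ++ (if C ∈ cp then [C] else []) := by
  apply PySem.List.sorted_eq_of_perm_of_pairwise_lt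
  · rw [List.perm_ext_iff_of_nodup]
    · intro x
      simp only [PySem.Set.mem_ofList, List.mem_filter]
      by_cases hA : A ∈ cp <;> by_cases hC : C ∈ cp <;>
        simp [hA, hC, hp] <;> aesop
    · by_cases hA : A ∈ cp <;> by_cases hC : C ∈ cp <;>
        simp [hA, hC, ne_of_lt hlt]
    · exact PySem.Set.nodup_ofList (cp.filter p)
  · by_cases hA : A ∈ cp <;> by_cases hC : C ∈ cp <;> simp [hA, hC] <;>
      exact String.lt_iff_toList_lt.mp hlt

-- sorted set of the enemies matching a one-square predicate
theorem pv_sorted_one (cp : List String) (B : String) (p : String → Bool)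
    (hp : ∀ e, p e = true ↔ e = B) :
    PySem.List.sorted (PySem.Set.ofList (cp.filter p)) (fun x => x) false
      = if B ∈ cp then [B] else [] := by
  apply PySem.List.sorted_eq_of_perm_of_pairwise_lt
  · rw [List.perm_ext_iff_of_nodup]
    · intro x
      simp only [PySem.Set.mem_ofList, List.mem_filter]
      by_cases hB : B ∈ cp <;> simp [hB, hp] <;> aesop
    · by_cases hB : B ∈ cp <;> simp [hB]
    · exact PySem.Set.nodup_ofList (cp.filter p)
  · by_cases hB : B ∈ cp <;> simp [hB]

-- one loop iteration of A appends exactly B's segment for that pawn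
theorem pv_step_eq (c : List String) (acc : List (List String)) (pawn : String) :
    pvStepA c acc pawn = acc ++ pvSegB c pawn := by
  unfold pvStepA pvSegB
  cases h : pawn.toList with
  | nil => simp
  | cons c0 t =>
    cases t with
    | nil => simp
    | cons c1 rest =>
      cases hn : PySem.Int.ofChars? [c1] with
      | none => simp [hn]
      | some n =>
        simp only [hn]
        by_cases hb : c0 = 'b'
        · subst hb
          rw [if_pos rfl, if_pos rfl]
          rw [pv_sorted_two c (String.ofList ('a' :: PySem.Int.toChars (n + 1)))
                (String.ofList ('c' :: PySem.Int.toChars (n + 1)))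
                (pv_lt_ac _) _
                (fun e => by
                  rw [Bool.and_or_distrib_left]
                  simp only [Bool.or_eq_true]
                  rw [pv_pred_iff e _ 'a', pv_pred_iff e _ 'c'])]
          by_cases h1 : String.ofList ('b' :: PySem.Int.toChars (n + 1)) ∈ c <;>
          by_cases h2 : String.ofList ('a' :: PySem.Int.toChars (n + 1)) ∈ c <;>
          by_cases h3 : String.ofList ('c' :: PySem.Int.toChars (n + 1)) ∈ c <;>
            simp [h1, h2, h3, List.forall_mem_ne']
        · rw [if_neg hb, if_neg hb]
          rw [pv_sorted_one c (String.ofList ('b' :: PySem.Int.toChars (n + 1))) _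
                (fun e => pv_pred_iff e _ 'b')]
          by_cases h1 : String.ofList (c0 :: PySem.Int.toChars (n + 1)) ∈ c <;>
          by_cases h2 : String.ofList ('b' :: PySem.Int.toChars (n + 1)) ∈ c <;>
            simp [h1, h2, List.forall_mem_ne']

-- ===== VERDICT (by name: the statement is the Claim_ definition above) =====
theorem player_legal_moves_spec : Claim_equal_player_legal_moves := by
  intro playerpos computerpos _ _
  unfold Spec_player_legal_moves player_legal_moves player_legal_moves_alt
  have hf : pvStepA computerpos = fun acc pawn => acc ++ pvSegB computerpos pawn := by
    funext acc pawn; exact pv_step_eq computerpos acc pawn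
  rw [hf]
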